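-- pv_equiv track=rewrite | github.com/linyvonnea/mitochime | src/scripts/dl_encode_fastq_R1_L150_k6_L256.py | kmer_to_id
-- ===== SOURCE A (Python) =====
-- def kmer_to_id(kmer: str) -> int:
--     """
--     Base-4 encoding A,C,G,T -> 0..(4^k - 1).
--     Any k-mer containing non-ACGT -> UNK id (0).
--     We reserve 0 as UNK/PAD, and shift real kmers by +1.
--     """
--     m = {"A": 0, "C": 1, "G": 2, "T": 3}
--     v = 0
--     for ch in kmer:
--         if ch not in m:
--             return 0  # UNK
--         v = v * 4 + m[ch]
--     return v + 1  # shift so UNK=0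
-- ===== SOURCE B (Python) =====
-- def kmer_to_id(kmer: str) -> int:
--     """Validate first, then compute the base-4 value by a positional closed form."""
--     m = {"A": 0, "C": 1, "G": 2, "T": 3}
--     if not set(kmer) <= set(m):
--         return 0  # UNK
--     k = len(kmer)
--     return sum(m[ch] * 4 ** (k - 1 - i) for i, ch in enumerate(kmer)) + 1
-- ===== Notes on version B (the rewrite author's own statement) =====
-- stated objective: alternative
-- what changed: Replaces A's single interleaved validate-and-accumulate Horner loop with a separate whole-string set-membership validation pass followed by a positional power-of-4 summation over enumerate.
import Mathlib
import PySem

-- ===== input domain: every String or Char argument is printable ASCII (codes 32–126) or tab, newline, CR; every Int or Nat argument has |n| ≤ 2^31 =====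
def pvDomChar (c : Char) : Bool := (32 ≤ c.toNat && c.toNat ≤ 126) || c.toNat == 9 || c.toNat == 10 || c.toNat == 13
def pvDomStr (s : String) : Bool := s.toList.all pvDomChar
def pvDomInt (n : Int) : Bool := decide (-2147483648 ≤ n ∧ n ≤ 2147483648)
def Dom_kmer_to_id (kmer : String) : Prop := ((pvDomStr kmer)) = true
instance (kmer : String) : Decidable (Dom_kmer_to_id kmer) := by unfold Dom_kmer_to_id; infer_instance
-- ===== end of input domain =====

-- B replaces A's interleaved validate-and-accumulate Horner loop by a separate
-- whole-string validation pass followed by a positional power-of-4 summation (objective: alternative).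

-- ===== PORT A =====
-- the dict m = {"A":0,"C":1,"G":2,"T":3}: lookup returning none when ch not in m
def pvMA (c : Char) : Option Int :=
  if c = 'A' then some 0 else if c = 'C' then some 1
  else if c = 'G' then some 2 else if c = 'T' then some 3 else none

-- A's for-loop with early return 0 on a non-ACGT char, accumulator v
def pvLoopA : List Char → Int → Int
  | [], v => v + 1
  | c :: rest, v =>
    match pvMA c with
    | none => 0
    | some d => pvLoopA rest (v * 4 + d)

def kmer_to_id (kmer : String) : Int := pvLoopA kmer.toList 0

-- ===== PORT B =====
-- m[ch] for B (only applied after whole-string validation)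
def pvMB (c : Char) : Int :=
  if c = 'A' then 0 else if c = 'C' then 1
  else if c = 'G' then 2 else if c = 'T' then 3 else 0

def kmer_to_id_alt (kmer : String) : Int :=
  let l := kmer.toList
  if l.all (fun c => c ∈ ['A', 'C', 'G', 'T']) then
    ((PySem.List.enumerate l).map
      (fun p => pvMB p.2 * 4 ^ (l.length - 1 - p.1.toNat))).sum + 1
  else 0

-- ===== PRECONDITION & SPEC =====
def Spec_kmer_to_id (kmer : String) (out : Int) : Prop := out = kmer_to_id_alt kmer
instance (kmer : String) (out : Int) : Decidable (Spec_kmer_to_id kmer out) := by unfold Spec_kmer_to_id; infer_instance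

-- ===== CLAIM (what is proved, stated in full; the proofs are below) =====
def Claim_equal_kmer_to_id : Prop := ∀ (kmer : String), Dom_kmer_to_id kmer → Spec_kmer_to_id kmer (kmer_to_id kmer)

-- ===== LEMMAS AND PROOFS =====

def pvValid (c : Char) : Bool := decide (c ∈ ['A', 'C', 'G', 'T'])

theorem pvMA_eq (c : Char) :
    pvMA c = if pvValid c then some (pvMB c) else none := by
  unfold pvMA pvMB pvValid
  by_cases hA : c = 'A' <;> by_cases hC : c = 'C' <;>
    by_cases hG : c = 'G' <;> by_cases hT : c = 'T' <;>
    simp [hA, hC, hG, hT]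

-- shift lemma for the enumerate sum
theorem pv_shift (K : Nat) (l : List Char) : ∀ (s : Nat),
    ((PySem.List.enumerate l ((s : Int) + 1)).map
      (fun p => pvMB p.2 * 4 ^ (K + 1 - p.1.toNat))).sum
    = ((PySem.List.enumerate l (s : Int)).map
      (fun p => pvMB p.2 * 4 ^ (K - p.1.toNat))).sum := by
  induction l with
  | nil => intro s; simp [PySem.List.enumerate_nil]
  | cons c t ih =>
    intro s
    rw [PySem.List.enumerate_cons, PySem.List.enumerate_cons]
    simp only [List.map_cons, List.sum_cons]
    have h1 : ((s : Int) + 1).toNat = s + 1 := by omega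
    have h2 : ((s : Int)).toNat = s := by omega
    have h3 : K + 1 - (s + 1) = K - s := by omega
    have h4 : (s : Int) + 1 + 1 = ((s + 1 : Nat) : Int) + 1 := by push_cast; ring
    rw [h1, h2, h3, h4, ih (s + 1)]
    have h5 : ((s + 1 : Nat) : Int) = (s : Int) + 1 := by push_cast; ring
    rw [h5]

def pvBSum (l : List Char) : Int :=
  ((PySem.List.enumerate l).map
    (fun p => pvMB p.2 * 4 ^ (l.length - 1 - p.1.toNat))).sum

theorem pvBSum_cons (c : Char) (t : List Char) :
    pvBSum (c :: t) = pvMB c * 4 ^ t.length + pvBSum t := by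
  cases t with
  | nil =>
    simp [pvBSum, PySem.List.enumerate]
  | cons d u =>
    have key := pv_shift u.length (d :: u) 0
    unfold pvBSum
    rw [show PySem.List.enumerate (c :: d :: u) = PySem.List.enumerate (c :: d :: u) 0 from rfl,
        PySem.List.enumerate_cons]
    simp only [List.map_cons, List.sum_cons, List.length_cons, Nat.add_sub_cancel,
      Int.toNat_zero, Nat.sub_zero, Nat.cast_zero] at key ⊢
    rw [key]

theorem pvLoopA_eq (l : List Char) : ∀ (v : Int),
    pvLoopA l v = if l.all pvValid then v * 4 ^ l.length + pvBSum l + 1 else 0 := by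
  induction l with
  | nil => intro v; simp [pvLoopA, pvBSum, PySem.List.enumerate]
  | cons c t ih =>
    intro v
    rw [pvLoopA, pvMA_eq]
    by_cases hc : pvValid c = true
    · simp only [hc, if_true, List.all_cons, Bool.true_and, ih]
      by_cases ht : t.all pvValid = true
      · simp only [ht, if_true, pvBSum_cons, List.length_cons]
        ring
      · simp [ht]
    · simp only [Bool.not_eq_true] at hc
      simp [hc]

-- ===== VERDICT (by name: the statement is the Claim_ definition above) =====
theorem pvAlt_eq (kmer : String) :
    kmer_to_id_alt kmer
    = if kmer.toList.all (fun c => c ∈ ['A', 'C', 'G', 'T']) then pvBSum kmer.toList + 1 else 0 :=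
  rfl

theorem kmer_to_id_spec : Claim_equal_kmer_to_id := by
  intro kmer _
  unfold Spec_kmer_to_id
  rw [pvAlt_eq]
  unfold kmer_to_id
  rw [pvLoopA_eq]
  have hall : kmer.toList.all pvValid
      = kmer.toList.all (fun c => c ∈ ['A', 'C', 'G', 'T']) := by
    unfold pvValid; rfl
  rw [hall]
  split
  · ring
  · rfl
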